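-- pv_equiv track=rewrite | github.com/tristan-mcinnis/voice-agent | server/tools/vision.py | strip_reasoning
-- ===== SOURCE A (Python) =====
-- _REASONING_MARKERS = (
--     "wait,", "actually,", "let me think", "let's think", "let's keep",
--     "let's go", "possible answer", "or simpler", "or even shorter",
--     "the user", "the question", "i need to", "key elements",
-- )
--
-- def strip_reasoning(text: str) -> str:
--     """Drop chain-of-thought preamble from reasoning-model output."""
--     if not text:
--         return text
--     lower = text.lower()
--     if not any(m in lower for m in _REASONING_MARKERS):
--         return text.strip()
--
--     lines = [l.strip() for l in text.splitlines() if l.strip()]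
--     tail: list[str] = []
--     for line in reversed(lines):
--         if any(m in line.lower() for m in _REASONING_MARKERS):
--             break
--         tail.append(line)
--     if tail:
--         result = " ".join(reversed(tail)).strip()
--     else:
--         result = lines[-1] if lines else text
--     return result.strip().strip('"').strip("'").strip()
-- ===== SOURCE B (Python) =====
-- _REASONING_MARKERS = (
--     "wait,", "actually,", "let me think", "let's think", "let's keep",
--     "let's go", "possible answer", "or simpler", "or even shorter",
--     "the user", "the question", "i need to", "key elements",
-- )
--
-- def strip_reasoning(text: str) -> str:
--     """Drop chain-of-thought preamble from reasoning-model output."""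
--     if not text:
--         return text
--     lower = text.lower()
--     if not any(m in lower for m in _REASONING_MARKERS):
--         return text.strip()
--
--     # single forward pass: keep the tail of clean lines since the last
--     # marker line, and remember the last nonempty line for the fallback
--     tail: list[str] = []
--     last = None
--     for raw in text.splitlines():
--         s = raw.strip()
--         if not s:
--             continue
--         last = s
--         if any(m in s.lower() for m in _REASONING_MARKERS):
--             tail = []
--         else:
--             tail.append(s)
--     result = " ".join(tail).strip() if tail else (last if last is not None else text)
--     return result.strip().strip('"').strip("'").strip()
-- ===== Notes on version B (the rewrite author's own statement) =====
-- stated objective: alternative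
-- what changed: Replaces A's three staged passes (build a stripped nonempty line list, reverse-iterate accumulating a tail until a marker line, then a lines[-1] fallback) with a single forward fold over the raw lines that carries (tail-since-last-marker, last-nonempty-line) state and never builds the line list, reverses, or slices.
import Mathlib
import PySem

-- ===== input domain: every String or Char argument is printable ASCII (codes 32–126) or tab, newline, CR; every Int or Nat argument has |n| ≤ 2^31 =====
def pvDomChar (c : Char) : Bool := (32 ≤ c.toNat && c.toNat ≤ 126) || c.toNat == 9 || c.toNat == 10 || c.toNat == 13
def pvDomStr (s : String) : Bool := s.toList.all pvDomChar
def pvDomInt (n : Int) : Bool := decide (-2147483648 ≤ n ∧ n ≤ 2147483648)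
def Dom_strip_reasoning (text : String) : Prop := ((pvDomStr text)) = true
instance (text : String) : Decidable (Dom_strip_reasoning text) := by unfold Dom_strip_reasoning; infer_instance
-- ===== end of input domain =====

-- B fuses A's three staged passes (build stripped-nonempty line list, reverse scan with break,
-- fallback on lines[-1]) into ONE forward fold over the raw lines carrying (tail, last-line) state;
-- an alternative decomposition of the same cost.

-- the module constant _REASONING_MARKERS, shared by both Pythons
def reasoningMarkers : List String :=
  ["wait,", "actually,", "let me think", "let's think", "let's keep",
   "let's go", "possible answer", "or simpler", "or even shorter",
   "the user", "the question", "i need to", "key elements"]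

-- any(m in line.lower() for m in _REASONING_MARKERS)  (used verbatim by both Pythons)
def hasMarker (line : String) : Bool :=
  reasoningMarkers.any (fun m => PySem.Str.isIn m (PySem.Str.lower line))

-- ===== PORT A =====
-- the reverse for-loop with break: tail.append until a marker line is met
def stripLoopA : List String → List String
  | [] => []
  | l :: rest => if hasMarker l then [] else l :: stripLoopA rest

def strip_reasoning (text : String) : String :=
  if text = "" then text
  else
    let lower := PySem.Str.lower text
    if !(reasoningMarkers.any (fun m => PySem.Str.isIn m lower)) then PySem.Str.strip text
    else
      let lines := ((PySem.Str.splitlines text).map PySem.Str.strip).filter (fun l => !(l = ""))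
      let tail := stripLoopA lines.reverse
      let result :=
        if !(tail = []) then PySem.Str.strip (PySem.Str.join " " tail.reverse)
        else match lines.getLast? with
             | some l => l
             | none => text
      PySem.Str.strip (PySem.Str.stripChars (PySem.Str.stripChars (PySem.Str.strip result) "\"") "'")

-- ===== PORT B =====
-- the single forward for-loop over raw lines: state = (tail since last marker line, last nonempty line)
def scanB : List String → List String × Option String → List String × Option String
  | [], st => st
  | raw :: rest, (tl, last) =>
      let s := PySem.Str.strip raw
      if s = "" then scanB rest (tl, last)
      else if hasMarker s then scanB rest ([], some s)
      else scanB rest (tl ++ [s], some s)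

def strip_reasoning_alt (text : String) : String :=
  if text = "" then text
  else
    let lower := PySem.Str.lower text
    if !(reasoningMarkers.any (fun m => PySem.Str.isIn m lower)) then PySem.Str.strip text
    else
      let st := scanB (PySem.Str.splitlines text) ([], none)
      let result :=
        if !(st.1 = []) then PySem.Str.strip (PySem.Str.join " " st.1)
        else match st.2 with
             | some l => l
             | none => text
      PySem.Str.strip (PySem.Str.stripChars (PySem.Str.stripChars (PySem.Str.strip result) "\"") "'")

-- ===== PRECONDITION & SPEC =====
def Spec_strip_reasoning (text : String) (out : String) : Prop := out = strip_reasoning_alt text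
instance (text : String) (out : String) : Decidable (Spec_strip_reasoning text out) := by unfold Spec_strip_reasoning; infer_instance

-- ===== CLAIM (what is proved, stated in full; the proofs are below) =====
def Claim_equal_strip_reasoning : Prop := ∀ (text : String), Dom_strip_reasoning text → Spec_strip_reasoning text (strip_reasoning text)

-- ===== LEMMAS AND PROOFS =====

-- the one step B's loop performs on a nonempty stripped line
def stepB (st : List String × Option String) (s : String) : List String × Option String :=
  if hasMarker s then ([], some s) else (st.1 ++ [s], some s)

-- B's fold over raw lines = fold of stepB over the stripped nonempty lines (A's `lines`)
theorem scanB_eq_foldl (L : List String) (st : List String × Option String) :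
    scanB L st = ((L.map PySem.Str.strip).filter (fun l => !(l = ""))).foldl stepB st := by
  induction L generalizing st with
  | nil => simp [scanB]
  | cons raw rest ih =>
    obtain ⟨tl, last⟩ := st
    by_cases hs : PySem.Str.strip raw = ""
    · simp [scanB, hs, ih]
    · by_cases hm : hasMarker (PySem.Str.strip raw) <;>
        simp [scanB, hs, hm, ih, stepB]

-- the folded state: tail = A's reversed reverse-scan, last = A's lines.getLast?
theorem foldl_stepB (lines : List String) :
    lines.foldl stepB ([], none) = ((stripLoopA lines.reverse).reverse, lines.getLast?) := by
  induction lines using List.reverseRecOn with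
  | nil => simp [stripLoopA]
  | append_singleton M x ih =>
    rw [List.foldl_append, ih]
    by_cases hx : hasMarker x <;>
      simp [stepB, hx, List.reverse_append, stripLoopA]

-- ===== VERDICT (by name: the statement is the Claim_ definition above) =====
theorem strip_reasoning_spec : Claim_equal_strip_reasoning := by
  intro text _
  unfold Spec_strip_reasoning strip_reasoning strip_reasoning_alt
  by_cases h0 : text = ""
  · rw [if_pos h0, if_pos h0]
  · simp only [if_neg h0]
    by_cases hm : (!reasoningMarkers.any fun m => PySem.Str.isIn m (PySem.Str.lower text)) = true
    · rw [if_pos hm, if_pos hm]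
    · rw [if_neg hm, if_neg hm, scanB_eq_foldl, foldl_stepB]
      set lines := (((PySem.Str.splitlines text).map PySem.Str.strip).filter (fun l => !(l = "")))
      by_cases ht : stripLoopA lines.reverse = [] <;> simp [ht]
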